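-- pv_equiv track=rewrite | github.com/hideosugimoto/knowledge-asset-tool | scripts/check_slide_overflow.py | _split_slides
-- ===== SOURCE A (Python) =====
-- def _split_slides(content):
--     """Marp スライドを --- で分割し、各スライドの (開始行番号, テキスト) を返す。
--
--     最初の YAML frontmatter (--- で囲まれた部分) はスキップする。
--     """
--     lines = content.splitlines(keepends=True)
--     slides = []
--     current_lines = []
--     current_start = 1
--     in_frontmatter = False
--     frontmatter_ended = False
--
--     for i, line in enumerate(lines, 1):
--         stripped = line.strip()
--
--         if i == 1 and stripped == "---":
--             in_frontmatter = True
--             continue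
--
--         if in_frontmatter:
--             if stripped == "---":
--                 in_frontmatter = False
--                 frontmatter_ended = True
--                 current_start = i + 1
--             continue
--
--         if stripped == "---":
--             if current_lines:
--                 slides.append((current_start, "".join(current_lines)))
--             current_lines = []
--             current_start = i + 1
--         else:
--             current_lines.append(line)
--
--     if current_lines:
--         slides.append((current_start, "".join(current_lines)))
--
--     return slides
-- ===== SOURCE B (Python) =====
-- def _split_slides(content):
--     """Index-based split: collect all '---' separator positions once, then build
--     each slide by slicing between consecutive cut points (no buffer, no flags)."""
--     lines = content.splitlines(keepends=True)
--     seps = [i for i, l in enumerate(lines) if l.strip() == "---"]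
--     if seps and seps[0] == 0:
--         if len(seps) == 1:
--             return []
--         start, seps = seps[1] + 1, seps[2:]
--     else:
--         start = 0
--     bounds = zip([start] + [s + 1 for s in seps], seps + [len(lines)])
--     return [(a + 1, "".join(lines[a:b])) for a, b in bounds if a < b]
-- ===== Notes on version B (the rewrite author's own statement) =====
-- stated objective: alternative
-- what changed: Replaces A's streaming scan (per-line flag state machine accumulating a current-lines buffer) by an index-based construction: one comprehension collects every separator-line position, frontmatter is handled by inspecting the first two positions, and the slides are produced by zipping consecutive cut points and slicing the line list between them.
import Mathlib
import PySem

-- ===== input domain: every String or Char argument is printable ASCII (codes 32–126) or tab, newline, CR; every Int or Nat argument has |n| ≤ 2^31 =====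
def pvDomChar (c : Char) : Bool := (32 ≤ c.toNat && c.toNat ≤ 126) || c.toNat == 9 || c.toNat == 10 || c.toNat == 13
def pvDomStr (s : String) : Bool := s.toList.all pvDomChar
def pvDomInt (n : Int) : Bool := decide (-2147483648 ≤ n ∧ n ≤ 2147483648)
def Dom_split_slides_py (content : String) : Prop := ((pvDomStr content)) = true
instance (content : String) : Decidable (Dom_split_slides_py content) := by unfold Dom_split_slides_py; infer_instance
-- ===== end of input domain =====

-- B replaces A's flag-driven buffer scan by collecting separator indices once and slicing between cut points; objective: alternative.

-- splitlines(keepends=True), hand-ported: exact on strings whose only line-break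
-- characters are '\n', '\r' and '\r\n' (true on the Dom alphabet).
def pvSlkAux (acc : List Char) : List Char → List (List Char)
  | [] => if acc.isEmpty then [] else [acc.reverse]
  | c :: rest =>
    if c = '\n' then (acc.reverse ++ ['\n']) :: pvSlkAux [] rest
    else if c = '\r' then
      if rest.head? = some '\n' then (acc.reverse ++ ['\r', '\n']) :: pvSlkAux [] rest.tail
      else (acc.reverse ++ ['\r']) :: pvSlkAux [] rest
    else pvSlkAux (c :: acc) rest
termination_by cs => cs.length
decreasing_by all_goals (simp [List.length_tail]; try omega)

def pvDash : List Char := ['-', '-', '-']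

-- ===== PORT A =====
-- A's for-loop: state (slides, current_lines, current_start, in_frontmatter, frontmatter_ended)
def pvLoopA (ls : List (List Char)) (i : Nat) (slides : List (Int × String))
    (cur : List (List Char)) (start : Int) (infm fmend : Bool) : List (Int × String) :=
  match ls with
  | [] => if cur.isEmpty then slides else slides ++ [(start, String.ofList cur.flatten)]
  | l :: rest =>
    let stripped := PySem.Chars.strip l
    if i = 1 ∧ stripped = pvDash then pvLoopA rest (i + 1) slides cur start true fmend
    else if infm then
      if stripped = pvDash then pvLoopA rest (i + 1) slides cur ((i : Int) + 1) false true
      else pvLoopA rest (i + 1) slides cur start infm fmend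
    else if stripped = pvDash then
      pvLoopA rest (i + 1)
        (if cur.isEmpty then slides else slides ++ [(start, String.ofList cur.flatten)])
        [] ((i : Int) + 1) infm fmend
    else pvLoopA rest (i + 1) slides (cur ++ [l]) start infm fmend

def split_slides_py (content : String) : List (Int × String) :=
  pvLoopA (pvSlkAux [] content.toList) 1 [] [] 1 false false

-- ===== PORT B =====
-- B's bounds-zip comprehension: [(a + 1, "".join(lines[a:b])) for a, b in zip(...) if a < b]
-- (lines[a:b] = PySem.List.slice; all cut points here are nonneg, as in B)
def pvZipSlices (lines : List (List Char)) (start : Int) (seps : List Int) : List (Int × String) :=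
  ((start :: seps.map (· + 1)).zip (seps ++ [(lines.length : Int)])).filterMap
    (fun p => if p.1 < p.2 then
        some (p.1 + 1, String.ofList (PySem.List.slice lines (some p.1) (some p.2)).flatten)
      else none)

def split_slides_py_alt (content : String) : List (Int × String) :=
  let lines := pvSlkAux [] content.toList
  let seps := (PySem.List.enumerate lines 0).filterMap
    (fun p => if PySem.Chars.strip p.2 = pvDash then some p.1 else none)
  match seps with
  | [] => pvZipSlices lines 0 []
  | s0 :: srest =>
    if s0 = 0 then
      match srest with
      | [] => []
      | s1 :: stail => pvZipSlices lines (s1 + 1) stail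
    else pvZipSlices lines 0 (s0 :: srest)

-- ===== PRECONDITION & SPEC =====
def Spec_split_slides_py (content : String) (out : List (Int × String)) : Prop := out = split_slides_py_alt content
instance (content : String) (out : List (Int × String)) : Decidable (Spec_split_slides_py content out) := by unfold Spec_split_slides_py; infer_instance

-- ===== CLAIM =====
def Claim_equal_split_slides_py : Prop := ∀ (content : String), Dom_split_slides_py content → Spec_split_slides_py content (split_slides_py content)

-- ===== LEMMAS AND PROOFS =====

-- proof-side: absolute (Nat) positions of the '---' lines of ls, ls starting at index k
def pvSepsFrom : List (List Char) → Nat → List Nat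
  | [], _ => []
  | l :: rest, k =>
    if PySem.Chars.strip l = pvDash then k :: pvSepsFrom rest (k + 1)
    else pvSepsFrom rest (k + 1)

-- proof-side: recursive characterization of the bounds-zip construction
def pvZipRec (lines : List (List Char)) (a : Nat) : List Nat → List (Int × String)
  | [] =>
    if a < lines.length then [((a : Int) + 1, String.ofList (lines.drop a).flatten)] else []
  | s :: ss =>
    (if a < s then [((a : Int) + 1, String.ofList ((lines.drop a).take (s - a)).flatten)] else [])
      ++ pvZipRec lines (s + 1) ss

-- proof-side: A's body loop (frontmatter over), rebased to 0-based line index k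
def pvBody : List (List Char) → Nat → List (List Char) → Int → List (Int × String)
  | [], _, buf, st => if buf.isEmpty then [] else [(st, String.ofList buf.flatten)]
  | l :: rest, k, buf, st =>
    if PySem.Chars.strip l = pvDash then
      (if buf.isEmpty then [] else [(st, String.ofList buf.flatten)])
        ++ pvBody rest (k + 1) [] ((k : Int) + 2)
    else pvBody rest (k + 1) (buf ++ [l]) st

theorem pvSepsFrom_lb (ls : List (List Char)) : ∀ (k e : Nat), e ∈ pvSepsFrom ls k → k ≤ e := by
  induction ls with
  | nil => intro k e h; simp [pvSepsFrom] at h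
  | cons l rest ih =>
    intro k e h
    simp only [pvSepsFrom] at h
    split at h
    · rcases List.mem_cons.1 h with h | h
      · omega
      · have := ih (k + 1) e h; omega
    · have := ih (k + 1) e h; omega

-- B's enumerate/filterMap comprehension computes pvSepsFrom, cast to Int
theorem pvSeps_cast (ls : List (List Char)) : ∀ (k : Nat),
    (PySem.List.enumerate ls (k : Int)).filterMap
        (fun p => if PySem.Chars.strip p.2 = pvDash then some p.1 else none)
      = (pvSepsFrom ls k).map (Nat.cast : Nat → Int) := by
  induction ls with
  | nil => intro k; simp [pvSepsFrom, PySem.List.enumerate_nil]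
  | cons l rest ih =>
    intro k
    rw [PySem.List.enumerate_cons, List.filterMap_cons,
      show ((k : Int) + 1) = ((k + 1 : Nat) : Int) by push_cast; ring, ih (k + 1)]
    by_cases hd : PySem.Chars.strip l = pvDash
    · simp [pvSepsFrom, hd]
    · simp [pvSepsFrom, hd]

-- the zip/filterMap form equals its recursive characterization (Nat cut points)
theorem pvZipSlices_eq (S : List Nat) : ∀ (lines : List (List Char)) (a : Nat),
    pvZipSlices lines (a : Int) (S.map (Nat.cast : Nat → Int)) = pvZipRec lines a S := by
  induction S with
  | nil =>
    intro lines a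
    simp only [pvZipSlices, pvZipRec, List.map_nil, List.nil_append, List.zip_cons_cons,
      List.zip_nil_left, List.filterMap_cons, List.filterMap_nil]
    by_cases h : a < lines.length
    · rw [if_pos (by exact_mod_cast h), PySem.List.slice_natCast,
        List.take_of_length_le (by simp)]
      simp [h]
    · rw [if_neg (by exact_mod_cast h)]
      simp [h]
  | cons s ss ih =>
    intro lines a
    simp only [pvZipSlices, pvZipRec, List.map_cons, List.cons_append, List.zip_cons_cons,
      List.filterMap_cons]
    have h2 : pvZipSlices lines ((s + 1 : Nat) : Int) (ss.map (Nat.cast : Nat → Int))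
        = pvZipRec lines (s + 1) ss := ih lines (s + 1)
    simp only [pvZipSlices] at h2
    rw [show ((s : Int) + 1) = ((s + 1 : Nat) : Int) by push_cast; ring, h2]
    by_cases h : a < s
    · rw [if_pos (by exact_mod_cast h), PySem.List.slice_natCast]
      simp [h]
    · rw [if_neg (by exact_mod_cast h)]
      simp [h]

-- A's body loop, rebased: once in_frontmatter is false and i = k + 2, it is pvBody
theorem pvLoopA_body (ls : List (List Char)) :
    ∀ (k : Nat) (slides : List (Int × String)) (buf : List (List Char)) (st : Int) (fe : Bool),
    pvLoopA ls (k + 2) slides buf st false fe = slides ++ pvBody ls (k + 1) buf st := by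
  induction ls with
  | nil =>
    intro k slides buf st fe
    simp only [pvLoopA, pvBody]
    split_ifs <;> simp
  | cons l rest ih =>
    intro k slides buf st fe
    simp only [pvLoopA, pvBody]
    rw [if_neg (by omega : ¬ (k + 2 = 1 ∧ PySem.Chars.strip l = pvDash)),
      if_neg (Bool.false_ne_true)]
    by_cases hd : PySem.Chars.strip l = pvDash
    · rw [if_pos hd, if_pos hd, ih (k + 1),
        show ((k + 2 : Nat) : Int) + 1 = ((k + 1 : Nat) : Int) + 2 by push_cast; ring]
      split_ifs <;> simp
    · rw [if_neg hd, if_neg hd, ih (k + 1)]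

-- A's body loop from cut point a with buffer lines[a : a+n] is the zip construction
theorem pvBody_eq (bs : List (List Char)) : ∀ (lines : List (List Char)) (a n : Nat),
    lines.drop (a + n) = bs →
    pvBody bs (a + n) ((lines.drop a).take n) ((a : Int) + 1)
      = pvZipRec lines a (pvSepsFrom bs (a + n)) := by
  induction bs with
  | nil =>
    intro lines a n hdrop
    have hlen : lines.length ≤ a + n := List.drop_eq_nil_iff.1 hdrop
    have htake : (lines.drop a).take n = lines.drop a :=
      List.take_of_length_le (by simp; omega)
    simp only [pvBody, pvSepsFrom, pvZipRec, htake]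
    by_cases h : a < lines.length
    · rw [if_pos h, if_neg (by rw [List.isEmpty_iff, List.drop_eq_nil_iff]; omega)]
    · rw [if_neg h, if_pos (by rw [List.isEmpty_iff, List.drop_eq_nil_iff]; omega)]
  | cons l bs' ih =>
    intro lines a n hdrop
    have hlt : a + n < lines.length := by
      by_contra hc
      rw [List.drop_eq_nil_iff.2 (by omega)] at hdrop
      simp at hdrop
    have hl : lines[a + n]? = some l := by
      have h0 : (lines.drop (a + n))[0]? = some l := by rw [hdrop]; rfl
      simpa using h0
    have hdrop' : lines.drop (a + n + 1) = bs' := by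
      have h1 : lines.drop (a + n + 1) = (lines.drop (a + n)).drop 1 := by
        rw [List.drop_drop]
      rw [h1, hdrop]; rfl
    simp only [pvBody, pvSepsFrom]
    by_cases hd : PySem.Chars.strip l = pvDash
    · rw [if_pos hd, if_pos hd]
      simp only [pvZipRec]
      have hrec := ih lines (a + n + 1) 0 (by simpa using hdrop')
      simp only [List.take_zero, Nat.add_zero] at hrec
      rw [show ((a + n : Nat) : Int) + 2 = ((a + n + 1 : Nat) : Int) + 1 by push_cast; ring,
        hrec]
      congr 1
      by_cases hn : n = 0
      · rw [if_pos (by simp [hn]), if_neg (by omega)]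
      · have hlb : ((lines.drop a).take n).length = n := by
          simp; omega
        rw [if_neg (by
            rw [List.isEmpty_iff]
            intro hc
            rw [hc] at hlb
            simp at hlb
            omega),
          if_pos (by omega : a < a + n),
          show a + n - a = n by omega]
    · rw [if_neg hd, if_neg hd]
      have hbuf : (lines.drop a).take (n + 1) = (lines.drop a).take n ++ [l] := by
        rw [List.take_add_one,
          show (lines.drop a)[n]? = some l by rw [List.getElem?_drop]; exact hl]
        rfl
      have hrec := ih lines a (n + 1) (by rw [show a + (n + 1) = a + n + 1 by omega]; exact hdrop')
      rw [show a + (n + 1) = a + n + 1 by omega, hbuf] at hrec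
      exact hrec

-- A's frontmatter skip: scans to the first '---', then runs the body loop after it
theorem pvLoopA_fm (ls : List (List Char)) :
    ∀ (lines : List (List Char)) (k : Nat) (st : Int) (fe : Bool),
    lines.drop (k + 1) = ls →
    pvLoopA ls (k + 2) [] [] st true fe =
      match pvSepsFrom ls (k + 1) with
      | [] => []
      | e :: S' => pvZipRec lines (e + 1) S' := by
  induction ls with
  | nil => intro lines k st fe _; rfl
  | cons l ls' ih =>
    intro lines k st fe hdrop
    have hdrop' : lines.drop (k + 2) = ls' := by
      have h1 : lines.drop (k + 2) = (lines.drop (k + 1)).drop 1 := by rw [List.drop_drop]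
      rw [h1, hdrop]; rfl
    simp only [pvLoopA, pvSepsFrom]
    rw [if_neg (by omega : ¬ (k + 2 = 1 ∧ PySem.Chars.strip l = pvDash)), if_pos trivial]
    by_cases hd : PySem.Chars.strip l = pvDash
    · rw [if_pos hd, if_pos hd]
      have hb := pvLoopA_body ls' (k + 1) [] [] (((k + 2 : Nat) : Int) + 1) true
      rw [show (k + 1) + 2 = (k + 2) + 1 by omega] at hb
      rw [hb, List.nil_append]
      have hrec := pvBody_eq ls' lines (k + 2) 0 (by simpa using hdrop')
      simp only [List.take_zero, Nat.add_zero] at hrec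
      rw [show (k + 1) + 1 = k + 2 by omega, hrec]
    · rw [if_neg hd, if_neg hd]
      rw [show (k + 2) + 1 = (k + 1) + 2 by omega]
      rw [ih lines (k + 1) st fe hdrop']

-- ===== VERDICT =====
theorem split_slides_py_spec : Claim_equal_split_slides_py := by
  intro content _
  unfold Spec_split_slides_py split_slides_py split_slides_py_alt
  dsimp only
  rw [show ((0 : Int)) = ((0 : Nat) : Int) by norm_num,
    pvSeps_cast (pvSlkAux [] content.toList) 0]
  rcases hls : pvSlkAux [] content.toList with _ | ⟨l, rest⟩
  · rfl
  · simp only [pvLoopA, pvSepsFrom, Nat.zero_add]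
    by_cases hd : PySem.Chars.strip l = pvDash
    · rw [if_pos (show (True ∧ PySem.Chars.strip l = pvDash) from ⟨trivial, hd⟩), if_pos hd,
        List.map_cons]
      have hfm := pvLoopA_fm rest (l :: rest) 0 1 false (by rfl)
      rw [show (0 : Nat) + 2 = 2 by omega, show (0 : Nat) + 1 = 1 by omega] at hfm
      rw [show (1 + 1 : Nat) = 2 by omega, hfm]
      dsimp only
      rw [if_pos (show ((0 : Nat) : Int) = ((0 : Nat) : Int) from rfl)]
      rcases hsep : pvSepsFrom rest 1 with _ | ⟨s1, stail⟩
      · rfl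
      · rw [List.map_cons]
        dsimp only
        have h1 := pvZipSlices_eq stail (l :: rest) (s1 + 1)
        rw [show ((s1 : Int) + 1) = ((s1 + 1 : Nat) : Int) by push_cast; ring, h1]
    · rw [if_neg (by simp [hd]), if_neg (Bool.false_ne_true), if_neg hd, if_neg hd]
      have hb := pvLoopA_body rest 0 [] ([] ++ [l]) 1 false
      rw [show (0 : Nat) + 2 = 2 by omega] at hb
      rw [show (1 + 1 : Nat) = 2 by omega, hb, List.nil_append]
      have hbody := pvBody_eq rest (l :: rest) 0 1 (by rfl)
      simp only [List.drop_zero, List.take_succ_cons, List.take_zero,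
        Nat.cast_zero, zero_add] at hbody
      rw [show ([] ++ [l] : List (List Char)) = [l] by rfl, show (0 : Nat) + 1 = 1 by omega,
        hbody]
      rcases hsep : pvSepsFrom rest 1 with _ | ⟨s0, S⟩
      · have h0 := pvZipSlices_eq ([] : List Nat) (l :: rest) 0
        simp only [List.map_nil] at h0
        rw [List.map_nil, ← h0]
      · have hlb : 1 ≤ s0 := pvSepsFrom_lb rest 1 s0 (by rw [hsep]; exact List.mem_cons_self)
        rw [List.map_cons]
        dsimp only
        rw [if_neg (by exact_mod_cast (by omega : ¬ s0 = 0))]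
        have h0 := pvZipSlices_eq (s0 :: S) (l :: rest) 0
        simp only [List.map_cons] at h0
        rw [← h0]
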